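-- pv_equiv track=rewrite | github.com/sutazai/sutazaiapp | scripts/service-mesh/optimize-load-balancing.py | get_service_type
-- ===== SOURCE A (Python) =====
-- from typing import Dict, List, Any
--
-- def get_service_type(service_name: str, tags: List[str]) -> str:
--     """Determine service type from name and tags."""
--     # Check tags first
--     if any(tag in ["ai", "llm", "inference"] for tag in tags):
--         return "ai"
--     elif any(tag in ["database", "db", "storage"] for tag in tags):
--         return "database"
--     elif any(tag in ["cache", "redis", "memcached"] for tag in tags):
--         return "cache"
--     elif any(tag in ["api", "rest", "graphql"] for tag in tags):
--         return "api"
--     elif any(tag in ["workflow", "automation"] for tag in tags):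
--         return "workflow"
--     elif any(tag in ["monitoring", "metrics", "logging"] for tag in tags):
--         return "monitoring"
--
--     # Fallback to name analysis
--     if "ollama" in service_name or "gpt" in service_name:
--         return "ai"
--     elif "postgres" in service_name or "neo4j" in service_name:
--         return "database"
--     elif "redis" in service_name:
--         return "cache"
--     elif "backend" in service_name or "api" in service_name:
--         return "api"
--     elif "flow" in service_name or "n8n" in service_name:
--         return "workflow"
--     elif "prometheus" in service_name or "grafana" in service_name:
--         return "monitoring"
--
--     return "api"  # Default
-- ===== SOURCE B (Python) =====
-- # Inverted index: one pass over tags collecting matched categories via a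
-- # keyword->category dict, then pick the highest-priority match; same for the
-- # name stage with a substring->category table.
-- TAG_TO_CAT = {
--     "ai": "ai", "llm": "ai", "inference": "ai",
--     "database": "database", "db": "database", "storage": "database",
--     "cache": "cache", "redis": "cache", "memcached": "cache",
--     "api": "api", "rest": "api", "graphql": "api",
--     "workflow": "workflow", "automation": "workflow",
--     "monitoring": "monitoring", "metrics": "monitoring", "logging": "monitoring",
-- }
--
-- NAME_SUBS = [
--     ("ollama", "ai"), ("gpt", "ai"),
--     ("postgres", "database"), ("neo4j", "database"),
--     ("redis", "cache"),
--     ("backend", "api"), ("api", "api"),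
--     ("flow", "workflow"), ("n8n", "workflow"),
--     ("prometheus", "monitoring"), ("grafana", "monitoring"),
-- ]
--
-- ORDER = ["ai", "database", "cache", "api", "workflow", "monitoring"]
--
--
-- def _first_by_priority(hits):
--     for cat in ORDER:
--         if cat in hits:
--             return cat
--     return None
--
--
-- def get_service_type(service_name, tags):
--     cat = _first_by_priority({TAG_TO_CAT[t] for t in tags if t in TAG_TO_CAT})
--     if cat is None:
--         cat = _first_by_priority({c for s, c in NAME_SUBS if s in service_name})
--     return "api" if cat is None else cat
-- ===== Notes on version B (the rewrite author's own statement) =====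
-- stated objective: alternative
-- what changed: Instead of testing the six keyword groups one after another against the tag list, B makes a single pass over the tags through an inverted keyword->category dict collecting the set of matched categories (and likewise collects all substring matches from a substring->category table for the name stage), then returns the first category in priority order found in that set.
import Mathlib
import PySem

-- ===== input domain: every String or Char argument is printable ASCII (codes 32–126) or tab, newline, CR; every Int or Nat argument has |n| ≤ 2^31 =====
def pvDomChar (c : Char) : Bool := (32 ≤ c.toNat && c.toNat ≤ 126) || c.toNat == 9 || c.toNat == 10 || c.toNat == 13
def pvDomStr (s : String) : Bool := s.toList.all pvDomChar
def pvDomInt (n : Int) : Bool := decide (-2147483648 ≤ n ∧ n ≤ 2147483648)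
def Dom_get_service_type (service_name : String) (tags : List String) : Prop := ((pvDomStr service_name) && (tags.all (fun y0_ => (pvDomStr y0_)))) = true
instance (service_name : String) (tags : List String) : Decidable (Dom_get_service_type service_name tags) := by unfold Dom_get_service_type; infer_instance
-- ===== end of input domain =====

-- B inverts the rule tables: one pass over tags through a keyword->category dict collects the matched categories, then the first category in priority order is picked; the name stage likewise collects all substring matches before prioritising (alternative decomposition).

-- ===== PORT A =====
def get_service_type (service_name : String) (tags : List String) : String :=
  if tags.any (fun tag => tag ∈ ["ai", "llm", "inference"]) then "ai"
  else if tags.any (fun tag => tag ∈ ["database", "db", "storage"]) then "database"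
  else if tags.any (fun tag => tag ∈ ["cache", "redis", "memcached"]) then "cache"
  else if tags.any (fun tag => tag ∈ ["api", "rest", "graphql"]) then "api"
  else if tags.any (fun tag => tag ∈ ["workflow", "automation"]) then "workflow"
  else if tags.any (fun tag => tag ∈ ["monitoring", "metrics", "logging"]) then "monitoring"
  else if PySem.Str.isIn "ollama" service_name || PySem.Str.isIn "gpt" service_name then "ai"
  else if PySem.Str.isIn "postgres" service_name || PySem.Str.isIn "neo4j" service_name then "database"
  else if PySem.Str.isIn "redis" service_name then "cache"
  else if PySem.Str.isIn "backend" service_name || PySem.Str.isIn "api" service_name then "api"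
  else if PySem.Str.isIn "flow" service_name || PySem.Str.isIn "n8n" service_name then "workflow"
  else if PySem.Str.isIn "prometheus" service_name || PySem.Str.isIn "grafana" service_name then "monitoring"
  else "api"

-- ===== PORT B =====
def pvTagToCat : PySem.Dict String String := PySem.Dict.ofList
  [("ai", "ai"), ("llm", "ai"), ("inference", "ai"),
   ("database", "database"), ("db", "database"), ("storage", "database"),
   ("cache", "cache"), ("redis", "cache"), ("memcached", "cache"),
   ("api", "api"), ("rest", "api"), ("graphql", "api"),
   ("workflow", "workflow"), ("automation", "workflow"),
   ("monitoring", "monitoring"), ("metrics", "monitoring"), ("logging", "monitoring")]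

def pvNameSubs : List (String × String) :=
  [("ollama", "ai"), ("gpt", "ai"),
   ("postgres", "database"), ("neo4j", "database"),
   ("redis", "cache"),
   ("backend", "api"), ("api", "api"),
   ("flow", "workflow"), ("n8n", "workflow"),
   ("prometheus", "monitoring"), ("grafana", "monitoring")]

def pvOrder : List String := ["ai", "database", "cache", "api", "workflow", "monitoring"]

-- 'for cat in ORDER: if cat in hits: return cat / return None'
def pvFirstByPriority (hits : PySem.Set String) : Option String :=
  pvOrder.find? (fun cat => PySem.Set.contains hits cat)

def get_service_type_alt (service_name : String) (tags : List String) : String :=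
  -- {TAG_TO_CAT[t] for t in tags if t in TAG_TO_CAT}
  let tagHits : PySem.Set String := PySem.Set.ofList (tags.filterMap (fun t => pvTagToCat.get? t))
  match pvFirstByPriority tagHits with
  | some cat => cat
  | none =>
    -- {c for s, c in NAME_SUBS if s in service_name}
    let nameHits : PySem.Set String := PySem.Set.ofList (pvNameSubs.filterMap (fun p => if PySem.Str.isIn p.1 service_name then some p.2 else none))
    match pvFirstByPriority nameHits with
    | some cat => cat
    | none => "api"

-- ===== PRECONDITION & SPEC =====
def Spec_get_service_type (service_name : String) (tags : List String) (out : String) : Prop := out = get_service_type_alt service_name tags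
instance (service_name : String) (tags : List String) (out : String) : Decidable (Spec_get_service_type service_name tags out) := by unfold Spec_get_service_type; infer_instance

-- ===== CLAIM (what is proved, stated in full; the proofs are below) =====
def Claim_equal_get_service_type : Prop := ∀ (service_name : String) (tags : List String), Dom_get_service_type service_name tags → Spec_get_service_type service_name tags (get_service_type service_name tags)

-- ===== LEMMAS AND PROOFS =====

theorem pv_items : pvTagToCat.items =
  [("ai", "ai"), ("llm", "ai"), ("inference", "ai"),
   ("database", "database"), ("db", "database"), ("storage", "database"),
   ("cache", "cache"), ("redis", "cache"), ("memcached", "cache"),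
   ("api", "api"), ("rest", "api"), ("graphql", "api"),
   ("workflow", "workflow"), ("automation", "workflow"),
   ("monitoring", "monitoring"), ("metrics", "monitoring"), ("logging", "monitoring")] := by decide

-- the keyword->category dict characterised as a grouped membership chain
theorem pv_lookup_eq (t : String) :
    pvTagToCat.get? t =
      if t ∈ ["ai", "llm", "inference"] then some "ai"
      else if t ∈ ["database", "db", "storage"] then some "database"
      else if t ∈ ["cache", "redis", "memcached"] then some "cache"
      else if t ∈ ["api", "rest", "graphql"] then some "api"
      else if t ∈ ["workflow", "automation"] then some "workflow"
      else if t ∈ ["monitoring", "metrics", "logging"] then some "monitoring"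
      else none := by
  have h : pvTagToCat.get? t = (List.find? (fun p => p.1 == t) pvTagToCat.items).map Prod.snd := by
    simp [PySem.Dict.get?]
  rw [h, pv_items]
  split_ifs with h1 h2 h3 h4 h5 h6
  · simp only [List.mem_cons, List.not_mem_nil, or_false] at h1
    rcases h1 with rfl | rfl | rfl <;> rfl
  · simp only [List.mem_cons, List.not_mem_nil, or_false] at h1 h2
    rcases h2 with rfl | rfl | rfl <;> simp_all [List.find?_cons]
  · simp only [List.mem_cons, List.not_mem_nil, or_false] at h1 h2 h3
    rcases h3 with rfl | rfl | rfl <;> simp_all [List.find?_cons]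
  · simp only [List.mem_cons, List.not_mem_nil, or_false] at h1 h2 h3 h4
    rcases h4 with rfl | rfl | rfl <;> simp_all [List.find?_cons]
  · simp only [List.mem_cons, List.not_mem_nil, or_false] at h1 h2 h3 h4 h5
    rcases h5 with rfl | rfl <;> simp_all [List.find?_cons]
  · simp only [List.mem_cons, List.not_mem_nil, or_false] at h1 h2 h3 h4 h5 h6
    rcases h6 with rfl | rfl | rfl <;> simp_all [List.find?_cons]
  · simp only [List.mem_cons, List.not_mem_nil, or_false] at h1 h2 h3 h4 h5 h6
    push Not at h1 h2 h3 h4 h5 h6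
    obtain ⟨e1, e2, e3⟩ := h1; obtain ⟨e4, e5, e6⟩ := h2; obtain ⟨e7, e8, e9⟩ := h3
    obtain ⟨e10, e11, e12⟩ := h4; obtain ⟨e13, e14⟩ := h5; obtain ⟨e15, e16, e17⟩ := h6
    simp [List.find?_cons, beq_iff_eq, Ne.symm e1, Ne.symm e2, Ne.symm e3, Ne.symm e4,
      Ne.symm e5, Ne.symm e6, Ne.symm e7, Ne.symm e8, Ne.symm e9, Ne.symm e10, Ne.symm e11,
      Ne.symm e12, Ne.symm e13, Ne.symm e14, Ne.symm e15, Ne.symm e16, Ne.symm e17]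

-- membership of a category in a collected hit set = 'any' over the matching sources
theorem pv_hits_contains {f : String → Option String} (tags : List String) (c : String) (g : List String)
    (h : ∀ t, f t = some c ↔ t ∈ g) :
    PySem.Set.contains (PySem.Set.ofList (tags.filterMap f)) c
      = tags.any (fun tag => tag ∈ g) := by
  rw [Bool.eq_iff_iff]
  simp only [PySem.Set.contains_iff, PySem.Set.mem_ofList, List.mem_filterMap,
    List.any_eq_true, decide_eq_true_eq, h]

-- membership in the name-hit set = 'any' over the substring table rows for that category
theorem pv_name_contains (n c : String) :
    PySem.Set.contains (PySem.Set.ofList (pvNameSubs.filterMap (fun p => if PySem.Str.isIn p.1 n then some p.2 else none))) c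
      = pvNameSubs.any (fun p => PySem.Str.isIn p.1 n && p.2 == c) := by
  rw [Bool.eq_iff_iff]
  simp only [PySem.Set.contains_iff, PySem.Set.mem_ofList, List.mem_filterMap,
    List.any_eq_true, Option.ite_none_right_eq_some, Option.some.injEq,
    Bool.and_eq_true, beq_iff_eq]

-- per-category specialisations of pv_lookup_eq
theorem pv_lookup_ai (t : String) : pvTagToCat.get? t = some "ai" ↔ t ∈ ["ai", "llm", "inference"] := by
  constructor
  · intro h; rw [pv_lookup_eq] at h; split_ifs at h <;> simp_all
  · intro h; simp only [List.mem_cons, List.not_mem_nil, or_false] at h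
    rcases h with rfl | rfl | rfl <;> decide
theorem pv_lookup_database (t : String) : pvTagToCat.get? t = some "database" ↔ t ∈ ["database", "db", "storage"] := by
  constructor
  · intro h; rw [pv_lookup_eq] at h; split_ifs at h <;> simp_all
  · intro h; simp only [List.mem_cons, List.not_mem_nil, or_false] at h
    rcases h with rfl | rfl | rfl <;> decide
theorem pv_lookup_cache (t : String) : pvTagToCat.get? t = some "cache" ↔ t ∈ ["cache", "redis", "memcached"] := by
  constructor
  · intro h; rw [pv_lookup_eq] at h; split_ifs at h <;> simp_all
  · intro h; simp only [List.mem_cons, List.not_mem_nil, or_false] at h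
    rcases h with rfl | rfl | rfl <;> decide
theorem pv_lookup_api (t : String) : pvTagToCat.get? t = some "api" ↔ t ∈ ["api", "rest", "graphql"] := by
  constructor
  · intro h; rw [pv_lookup_eq] at h; split_ifs at h <;> simp_all
  · intro h; simp only [List.mem_cons, List.not_mem_nil, or_false] at h
    rcases h with rfl | rfl | rfl <;> decide
theorem pv_lookup_workflow (t : String) : pvTagToCat.get? t = some "workflow" ↔ t ∈ ["workflow", "automation"] := by
  constructor
  · intro h; rw [pv_lookup_eq] at h; split_ifs at h <;> simp_all
  · intro h; simp only [List.mem_cons, List.not_mem_nil, or_false] at h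
    rcases h with rfl | rfl <;> decide
theorem pv_lookup_monitoring (t : String) : pvTagToCat.get? t = some "monitoring" ↔ t ∈ ["monitoring", "metrics", "logging"] := by
  constructor
  · intro h; rw [pv_lookup_eq] at h; split_ifs at h <;> simp_all
  · intro h; simp only [List.mem_cons, List.not_mem_nil, or_false] at h
    rcases h with rfl | rfl | rfl <;> decide

-- ===== VERDICT (by name: the statement is the Claim_ definition above) =====
set_option maxHeartbeats 1600000 in
theorem get_service_type_spec : Claim_equal_get_service_type := by
  intro service_name tags _
  unfold Spec_get_service_type get_service_type get_service_type_alt pvFirstByPriority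
  simp only [pvOrder, List.find?_cons, List.find?_nil,
    pv_hits_contains tags "ai" _ pv_lookup_ai,
    pv_hits_contains tags "database" _ pv_lookup_database,
    pv_hits_contains tags "cache" _ pv_lookup_cache,
    pv_hits_contains tags "api" _ pv_lookup_api,
    pv_hits_contains tags "workflow" _ pv_lookup_workflow,
    pv_hits_contains tags "monitoring" _ pv_lookup_monitoring,
    pv_name_contains]
  simp only [pvNameSubs, List.any_cons, List.any_nil, String.reduceBEq, beq_self_eq_true,
    Bool.and_true, Bool.and_false, Bool.or_false, PySem.Str.isIn]
  rcases Bool.eq_false_or_eq_true (tags.any (fun tag => tag ∈ ["ai", "llm", "inference"])) with h0 | h0 <;> (try simp only [h0, Bool.true_or, Bool.false_or, Bool.or_false, Bool.and_true, Bool.and_false]) <;> first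
    | rfl
    | (rcases Bool.eq_false_or_eq_true (tags.any (fun tag => tag ∈ ["database", "db", "storage"])) with h1 | h1 <;> (try simp only [h1, Bool.true_or, Bool.false_or, Bool.or_false, Bool.and_true, Bool.and_false]) <;> first
    | rfl
    | (rcases Bool.eq_false_or_eq_true (tags.any (fun tag => tag ∈ ["cache", "redis", "memcached"])) with h2 | h2 <;> (try simp only [h2, Bool.true_or, Bool.false_or, Bool.or_false, Bool.and_true, Bool.and_false]) <;> first
    | rfl
    | (rcases Bool.eq_false_or_eq_true (tags.any (fun tag => tag ∈ ["api", "rest", "graphql"])) with h3 | h3 <;> (try simp only [h3, Bool.true_or, Bool.false_or, Bool.or_false, Bool.and_true, Bool.and_false]) <;> first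
    | rfl
    | (rcases Bool.eq_false_or_eq_true (tags.any (fun tag => tag ∈ ["workflow", "automation"])) with h4 | h4 <;> (try simp only [h4, Bool.true_or, Bool.false_or, Bool.or_false, Bool.and_true, Bool.and_false]) <;> first
    | rfl
    | (rcases Bool.eq_false_or_eq_true (tags.any (fun tag => tag ∈ ["monitoring", "metrics", "logging"])) with h5 | h5 <;> (try simp only [h5, Bool.true_or, Bool.false_or, Bool.or_false, Bool.and_true, Bool.and_false]) <;> first
    | rfl
    | (rcases Bool.eq_false_or_eq_true (PySem.Chars.isIn "ollama".toList service_name.toList) with h6 | h6 <;> (try simp only [h6, Bool.true_or, Bool.false_or, Bool.or_false, Bool.and_true, Bool.and_false]) <;> first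
    | rfl
    | (rcases Bool.eq_false_or_eq_true (PySem.Chars.isIn "gpt".toList service_name.toList) with h7 | h7 <;> (try simp only [h7, Bool.true_or, Bool.false_or, Bool.or_false, Bool.and_true, Bool.and_false]) <;> first
    | rfl
    | (rcases Bool.eq_false_or_eq_true (PySem.Chars.isIn "postgres".toList service_name.toList) with h8 | h8 <;> (try simp only [h8, Bool.true_or, Bool.false_or, Bool.or_false, Bool.and_true, Bool.and_false]) <;> first
    | rfl
    | (rcases Bool.eq_false_or_eq_true (PySem.Chars.isIn "neo4j".toList service_name.toList) with h9 | h9 <;> (try simp only [h9, Bool.true_or, Bool.false_or, Bool.or_false, Bool.and_true, Bool.and_false]) <;> first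
    | rfl
    | (rcases Bool.eq_false_or_eq_true (PySem.Chars.isIn "redis".toList service_name.toList) with h10 | h10 <;> (try simp only [h10, Bool.true_or, Bool.false_or, Bool.or_false, Bool.and_true, Bool.and_false]) <;> first
    | rfl
    | (rcases Bool.eq_false_or_eq_true (PySem.Chars.isIn "backend".toList service_name.toList) with h11 | h11 <;> (try simp only [h11, Bool.true_or, Bool.false_or, Bool.or_false, Bool.and_true, Bool.and_false]) <;> first
    | rfl
    | (rcases Bool.eq_false_or_eq_true (PySem.Chars.isIn "api".toList service_name.toList) with h12 | h12 <;> (try simp only [h12, Bool.true_or, Bool.false_or, Bool.or_false, Bool.and_true, Bool.and_false]) <;> first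
    | rfl
    | (rcases Bool.eq_false_or_eq_true (PySem.Chars.isIn "flow".toList service_name.toList) with h13 | h13 <;> (try simp only [h13, Bool.true_or, Bool.false_or, Bool.or_false, Bool.and_true, Bool.and_false]) <;> first
    | rfl
    | (rcases Bool.eq_false_or_eq_true (PySem.Chars.isIn "n8n".toList service_name.toList) with h14 | h14 <;> (try simp only [h14, Bool.true_or, Bool.false_or, Bool.or_false, Bool.and_true, Bool.and_false]) <;> first
    | rfl
    | (rcases Bool.eq_false_or_eq_true (PySem.Chars.isIn "prometheus".toList service_name.toList) with h15 | h15 <;> (try simp only [h15, Bool.true_or, Bool.false_or, Bool.or_false, Bool.and_true, Bool.and_false]) <;> first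
    | rfl
    | (rcases Bool.eq_false_or_eq_true (PySem.Chars.isIn "grafana".toList service_name.toList) with h16 | h16 <;> (try simp only [h16, Bool.true_or, Bool.false_or, Bool.or_false, Bool.and_true, Bool.and_false]) <;> first
    | rfl
    | (rfl)))))))))))))))))
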